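-- pv_equiv track=rewrite | github.com/wjluoxiao/XB_ToolBox | nodes_vis.py | get_1d_chunks
-- ===== SOURCE A (Python) =====
-- def get_1d_chunks(total_len, chunk_size, overlap):
--     chunks = []
--     if chunk_size <= 0: return [(0, total_len)]
--     stride = max(1, chunk_size - min(overlap, int(chunk_size * 0.9)))
--     curr = 0
--     while curr < total_len:
--         start, end = curr, min(curr + chunk_size, total_len)
--         chunks.append((start, end))
--         if end >= total_len: break
--         curr += stride
--     return chunks
-- ===== SOURCE B (Python) =====
-- def get_1d_chunks(total_len, chunk_size, overlap):
--     # Closed-form chunk count instead of the break-driven while loop.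
--     if chunk_size <= 0:
--         return [(0, total_len)]
--     if total_len <= 0:
--         return []
--     stride = max(1, chunk_size - min(overlap, int(chunk_size * 0.9)))
--     # last appended chunk index: first i with i*stride + chunk_size >= total_len (break),
--     # capped by the first i with i*stride >= total_len (while condition).
--     n = min(max(0, -((chunk_size - total_len) // stride)) + 1,
--             -((-total_len) // stride))
--     return [(i * stride, min(i * stride + chunk_size, total_len)) for i in range(n)]
-- ===== Notes on version B (the rewrite author's own statement) =====
-- stated objective: alternative
-- what changed: Replaces A's break-driven while loop with a closed-form chunk count (ceiling divisions giving the break index capped by the loop-condition index) plus a single comprehension over range(n).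
import Mathlib
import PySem

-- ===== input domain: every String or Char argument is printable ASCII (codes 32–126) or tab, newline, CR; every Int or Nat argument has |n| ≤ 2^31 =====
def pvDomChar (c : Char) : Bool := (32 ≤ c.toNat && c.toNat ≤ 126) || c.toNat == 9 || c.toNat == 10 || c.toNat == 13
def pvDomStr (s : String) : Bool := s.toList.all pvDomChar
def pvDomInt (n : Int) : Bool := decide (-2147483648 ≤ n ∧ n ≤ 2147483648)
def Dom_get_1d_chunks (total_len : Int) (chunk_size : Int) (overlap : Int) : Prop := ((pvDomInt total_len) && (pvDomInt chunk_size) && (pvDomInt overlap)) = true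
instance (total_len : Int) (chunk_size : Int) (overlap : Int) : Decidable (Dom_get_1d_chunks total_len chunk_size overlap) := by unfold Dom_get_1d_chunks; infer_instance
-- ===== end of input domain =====

-- ===== PORT A =====
-- B replaces A's break-driven while loop with a closed-form chunk count plus one comprehension (alternative decomposition, same cost).
-- A's while loop: curr starts at 0, each iteration appends (curr, min(curr+chunk_size, total_len)),
-- breaks when the end reaches total_len, else advances by stride (stride ≥ 1 by construction,
-- carried as the hypothesis hs for termination).
def pvChunkLoopA (total cs stride : Int) (hs : 1 ≤ stride) (curr : Int) : List (Int × Int) :=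
  if curr < total then
    let e := min (curr + cs) total
    if total ≤ e then [(curr, e)]
    else (curr, e) :: pvChunkLoopA total cs stride hs (curr + stride)
  else []
termination_by (total - curr).toNat
decreasing_by omega

-- `int(chunk_size * 0.9)`: here chunk_size ≥ 1 (guard) and |chunk_size| ≤ 2^31 (Dom), where the
-- float product truncates exactly to floor(9*chunk_size/10); ported as floordiv (9*chunk_size) 10 (exact on Dom).
def get_1d_chunks (total_len : Int) (chunk_size : Int) (overlap : Int) : List (Int × Int) :=
  if chunk_size ≤ 0 then [(0, total_len)]
  else
    pvChunkLoopA total_len chunk_size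
      (max 1 (chunk_size - min overlap (PySem.Int.floordiv (9 * chunk_size) 10)))
      (le_max_left 1 _) 0

-- ===== PORT B =====
-- Same float-truncation note as in port A: int(chunk_size*0.9) = floordiv (9*chunk_size) 10 on Dom with chunk_size ≥ 1.
def get_1d_chunks_alt (total_len : Int) (chunk_size : Int) (overlap : Int) : List (Int × Int) :=
  if chunk_size ≤ 0 then [(0, total_len)]
  else if total_len ≤ 0 then []
  else
    let stride := max 1 (chunk_size - min overlap (PySem.Int.floordiv (9 * chunk_size) 10))
    let n := min (max 0 (-(PySem.Int.floordiv (chunk_size - total_len) stride)) + 1)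
                 (-(PySem.Int.floordiv (-total_len) stride))
    (PySem.List.pyRange 0 n 1).map (fun i => (i * stride, min (i * stride + chunk_size) total_len))

-- ===== PRECONDITION & SPEC =====
def Spec_get_1d_chunks (total_len : Int) (chunk_size : Int) (overlap : Int) (out : List (Int × Int)) : Prop := out = get_1d_chunks_alt total_len chunk_size overlap
instance (total_len : Int) (chunk_size : Int) (overlap : Int) (out : List (Int × Int)) : Decidable (Spec_get_1d_chunks total_len chunk_size overlap out) := by unfold Spec_get_1d_chunks; infer_instance

-- ===== CLAIM (what is proved, stated in full; the proofs are below) =====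
def Claim_equal_get_1d_chunks : Prop := ∀ (total_len : Int) (chunk_size : Int) (overlap : Int), Dom_get_1d_chunks total_len chunk_size overlap → Spec_get_1d_chunks total_len chunk_size overlap (get_1d_chunks total_len chunk_size overlap)

-- ===== LEMMAS AND PROOFS =====

-- The loop, started at i*stride, produces exactly the chunks for indices i, i+1, …, n-1,
-- where n = min (kb+1) kc with kb the break index and kc the while-condition index.
theorem pvLoopEq (t cs s : Int) (hs : 1 ≤ s) (ht : 0 < t) :
    ∀ (m : Nat) (i : Int), 0 ≤ i →
      i < min (max 0 (-(PySem.Int.floordiv (cs - t) s)) + 1) (-(PySem.Int.floordiv (-t) s)) →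
      ((min (max 0 (-(PySem.Int.floordiv (cs - t) s)) + 1) (-(PySem.Int.floordiv (-t) s))) - i).toNat ≤ m →
      pvChunkLoopA t cs s hs (i * s) =
        (PySem.List.pyRange i (min (max 0 (-(PySem.Int.floordiv (cs - t) s)) + 1) (-(PySem.Int.floordiv (-t) s))) 1).map
          (fun j => (j * s, min (j * s + cs) t)) := by
  have hspos : (0:Int) < s := by omega
  set kb : Int := max 0 (-(PySem.Int.floordiv (cs - t) s)) with hkb_def
  set kc : Int := -(PySem.Int.floordiv (-t) s) with hkc_def
  set n : Int := min (kb + 1) kc with hn_def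
  -- bracket facts
  have hbr : ∀ i : Int, 0 ≤ i → (kb ≤ i ↔ t ≤ i * s + cs) := by
    intro i hi
    have h1 : (-i ≤ PySem.Int.floordiv (cs - t) s) ↔ (-i) * s ≤ cs - t :=
      PySem.Int.le_floordiv_iff_mul_le hspos
    constructor
    · intro h
      have : -(PySem.Int.floordiv (cs - t) s) ≤ i := le_trans (le_max_right _ _) h
      have := h1.mpr (by nlinarith [h1.mp (by omega)])
      nlinarith [h1.mp (by omega : -i ≤ PySem.Int.floordiv (cs - t) s)]
    · intro h
      have : (-i) * s ≤ cs - t := by nlinarith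
      have h2 : -i ≤ PySem.Int.floordiv (cs - t) s := h1.mpr this
      simp only [hkb_def]
      omega
  have hcond : ∀ i : Int, (i < kc ↔ i * s < t) := by
    intro i
    have h1 : (PySem.Int.floordiv (-t) s < -i) ↔ -t < (-i) * s :=
      PySem.Int.floordiv_lt_iff_lt_mul hspos
    constructor
    · intro h
      have := h1.mp (by omega)
      nlinarith
    · intro h
      have : -t < (-i) * s := by nlinarith
      have := h1.mpr this
      omega
  have hkc1 : 1 ≤ kc := by
    have := (hcond 0).mpr (by simpa using ht)
    omega
  have hkcs : t ≤ kc * s := by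
    by_contra h
    exact absurd ((hcond kc).mpr (by omega)) (by omega)
  intro m
  induction m with
  | zero =>
    intro i hi hin hm
    omega
  | succ m ih =>
    intro i hi hin hm
    have hlt : i * s < t := (hcond i).mp (by omega)
    rw [pvChunkLoopA]
    rw [if_pos hlt]
    by_cases hbreak : t ≤ min (i * s + cs) t
    · -- break branch: last chunk, and n = i + 1
      have htle : t ≤ i * s + cs := by omega
      have hkbi : kb ≤ i := (hbr i hi).mpr htle
      have hni : n = i + 1 := by omega
      rw [if_pos hbreak, hni, PySem.List.pyRange_one_singleton i]
      simp
    · -- continue branch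
      have htgt : i * s + cs < t := by omega
      have hikb : i < kb := by
        by_contra h
        exact hbreak (by have := (hbr i hi).mp (by omega); omega)
      rw [if_neg hbreak]
      have hstep : i * s + s = (i + 1) * s := by ring
      have htail : pvChunkLoopA t cs s hs ((i + 1) * s) =
          (PySem.List.pyRange (i + 1) n 1).map (fun j => (j * s, min (j * s + cs) t)) := by
        by_cases hnext : i + 1 < n
        · exact ih (i + 1) (by omega) hnext (by omega)
        · -- i + 1 = n; since i + 1 ≤ kb, n = kc, so (i+1)*s ≥ t and both sides are empty
          have hn1 : i + 1 = n := by omega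
          have hnkc : n = kc := by omega
          have hge : ¬ ((i + 1) * s < t) := by
            rw [hn1, hnkc]; omega
          rw [pvChunkLoopA, if_neg hge, PySem.List.pyRange_one_eq_nil (by omega)]
          simp
      rw [PySem.List.pyRange_one_cons (by omega : i < n)]
      simp only [List.map_cons]
      rw [hstep, htail]

-- ===== VERDICT (by name: the statement is the Claim_ definition above) =====
theorem get_1d_chunks_spec : Claim_equal_get_1d_chunks := by
  intro t cs ov _
  unfold Spec_get_1d_chunks get_1d_chunks get_1d_chunks_alt
  by_cases hcs : cs ≤ 0
  · rw [if_pos hcs, if_pos hcs]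
  · rw [if_neg hcs, if_neg hcs]
    by_cases ht : t ≤ 0
    · rw [if_pos ht, pvChunkLoopA, if_neg (by omega : ¬ (0:Int) < t)]
    · rw [if_neg ht]
      have hs : (1:Int) ≤ max 1 (cs - min ov (PySem.Int.floordiv (9 * cs) 10)) := le_max_left 1 _
      have h0 :=
        pvLoopEq t cs (max 1 (cs - min ov (PySem.Int.floordiv (9 * cs) 10))) hs (by omega)
          ((min (max 0 (-(PySem.Int.floordiv (cs - t) (max 1 (cs - min ov (PySem.Int.floordiv (9 * cs) 10))))) + 1)
              (-(PySem.Int.floordiv (-t) (max 1 (cs - min ov (PySem.Int.floordiv (9 * cs) 10))))) - 0).toNat)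
          0 le_rfl ?hn le_rfl
      · simpa using h0
      case hn =>
        have hspos : (0:Int) < max 1 (cs - min ov (PySem.Int.floordiv (9 * cs) 10)) := by omega
        have h1 : (PySem.Int.floordiv (-t) (max 1 (cs - min ov (PySem.Int.floordiv (9 * cs) 10))) < 0) ↔
            -t < 0 * max 1 (cs - min ov (PySem.Int.floordiv (9 * cs) 10)) :=
          PySem.Int.floordiv_lt_iff_lt_mul hspos
        have := h1.mpr (by omega)
        omega
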